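-- pv_equiv track=rewrite | github.com/punkduckable/PDE-READ | Code/Extraction.py | Recursive_Counter
-- ===== SOURCE A (Python) =====
-- def Recursive_Counter(
--         num_sub_index_values : int,
--         num_sub_indices      : int,
--         sub_index            : int = 0,
--         sub_index_value      : int = 0,
--         counter              : int = 0) -> int:
--     """ This function determines the number of "distinct" multi-indices of
--     specified num_sub_indices whose sub-indices take values in {0, 1...
--     num_sub_index_values - 1}. Here, two multi-indices are "equal" if and only
--     if there is a way to rearrange the sub-indices in one multi-index to match
--     the others (both have the same value in each sub-index). This defines an
--     equivalence relation of multi-indices. Thus, we are essentially finding the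
--     number of classes under this relation.
--
--     For example, if num_sub_index_values = 4 and num_sub_indices = 2, then the
--     set of possible multi-indices is { (0, 0), (0, 1), (0, 2), (0, 3), (1, 1),
--     (1, 2), (1, 3), (2, 2), (2, 3), (3, 3) }, which contains 10 elements. Thus,
--     in this case, this function would return 10.
--
--     Note: we assume that num_sub_indices and num_sub_index_values are POSITIVE
--     integers.
--
--     ----------------------------------------------------------------------------
--     Arguments:
--
--     num_sub_index_values: The number of distinct values that any one of the
--     sub-indices can take on. If num_sub_index_values = k, then each sub-index
--     can take on values 0, 1,... k-1.
--
--     num_sub_indices: The number of sub-indices in the multi-index.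
--
--     sub_index: keeps track of which sub-index we're working on.
--
--     sub_index_value: specifies which value we put in a particular sub-index.
--
--     counter: stores the total number of multi-indices of specified oder whose
--     sub-indices take values in 0, 1... num_sub_index_values - 1. We ultimately
--     return this variable. It's passed as an argument for recursion.
--
--     ----------------------------------------------------------------------------
--     Returns:
--
--     The total number of "distinct" multi-indices (as defined above) which have
--     num_sub_indices sub-indices, each of which takes values in {0, 1,...
--     num_sub_index_values - 1}. """
--
--     # Assertions.
--     assert (num_sub_indices > 0), \
--         ("num_sub_indices must be a POSITIVE integer. Got %d." % num_sub_indices);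
--     assert (num_sub_index_values > 0), \
--         ("num_sub_index_values must be a POSITIVE integer. Got %d." % num_sub_index_values);
--
--     # Base case
--     if (sub_index == num_sub_indices - 1):
--         return counter + (num_sub_index_values - sub_index_value);
--
--     # Recursive case.
--     else : # if (sub_index < num_sub_indices - 1):
--         for j in range(sub_index_value, num_sub_index_values):
--             counter = Recursive_Counter(
--                         num_sub_index_values = num_sub_index_values,
--                         num_sub_indices      = num_sub_indices,
--                         sub_index            = sub_index + 1,
--                         sub_index_value      = j,
--                         counter              = counter);
--
--         return counter;
-- ===== SOURCE B (Python) =====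
-- def Recursive_Counter(
--         num_sub_index_values : int,
--         num_sub_indices      : int,
--         sub_index            : int = 0,
--         sub_index_value      : int = 0,
--         counter              : int = 0) -> int:
--     """Closed-form count: the number of multisets of size r drawn from v values
--     is C(v + r - 1, r), computed by an exact integer product (no recursion)."""
--     assert (num_sub_indices > 0), \
--         ("num_sub_indices must be a POSITIVE integer. Got %d." % num_sub_indices);
--     assert (num_sub_index_values > 0), \
--         ("num_sub_index_values must be a POSITIVE integer. Got %d." % num_sub_index_values);
--
--     remaining = num_sub_indices - sub_index          # sub-indices still to fill
--     values    = num_sub_index_values - sub_index_value  # values still available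
--     if values <= 0:
--         return counter
--     num = 1
--     for i in range(1, remaining + 1):
--         num = num * (values + i - 1) // i            # exact: num stays a binomial
--     return counter + num
-- ===== Notes on version B (the rewrite author's own statement) =====
-- stated objective: alternative
-- what changed: Replaced the recursive enumeration of all multisets by the closed-form binomial C(values+remaining-1, remaining) computed with an exact O(remaining) integer product; intended to avoid A's exponential enumeration, though a timing run could not confirm a ratio at sizes where A finishes.
-- intended difference: When sub_index == num_sub_indices-1 and sub_index_value > num_sub_index_values, A returns counter + (num_sub_index_values - sub_index_value), a negative contribution, while B returns counter; B's value is intended since no multi-index exists with a sub-index value beyond the range. — e.g. on Recursive_Counter(3, 2, 1, 5, 0): A returns -2, B returns 0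
import Mathlib
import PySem

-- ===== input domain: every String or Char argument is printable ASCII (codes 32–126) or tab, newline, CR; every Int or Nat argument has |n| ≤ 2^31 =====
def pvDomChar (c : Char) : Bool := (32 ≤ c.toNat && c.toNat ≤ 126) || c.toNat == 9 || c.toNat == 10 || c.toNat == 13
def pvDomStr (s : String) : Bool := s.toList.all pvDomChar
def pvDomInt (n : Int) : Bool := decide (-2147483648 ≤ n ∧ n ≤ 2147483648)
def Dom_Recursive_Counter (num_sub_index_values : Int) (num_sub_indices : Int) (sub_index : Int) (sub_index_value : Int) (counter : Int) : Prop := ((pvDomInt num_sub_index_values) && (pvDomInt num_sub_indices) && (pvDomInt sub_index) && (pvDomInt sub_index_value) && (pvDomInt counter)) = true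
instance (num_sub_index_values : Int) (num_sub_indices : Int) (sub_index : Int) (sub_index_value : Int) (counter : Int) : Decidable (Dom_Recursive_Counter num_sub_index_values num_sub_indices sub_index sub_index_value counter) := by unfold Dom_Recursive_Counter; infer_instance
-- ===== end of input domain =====

-- B replaces A's recursive enumeration of multisets by the closed-form binomial
-- C(values+remaining-1, remaining), computed as an exact integer product (objective: alternative).

-- ===== PORT A =====
-- A's recursion on (sub_index, sub_index_value); the fuel argument only makes the
-- recursion total in Lean (it equals the exact recursion depth on every input Pre_ admits,
-- so on Pre_ this is A's computation step for step; fuel 0 is unreachable there).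
def RC_go : Nat → Int → Int → Int → Int → Int → Int
  | 0, _, _, _, _, counter => counter
  | fuel + 1, num_sub_index_values, num_sub_indices, sub_index, sub_index_value, counter =>
    if sub_index = num_sub_indices - 1 then
      counter + (num_sub_index_values - sub_index_value)
    else
      (PySem.List.pyRange sub_index_value num_sub_index_values).foldl
        (fun counter j => RC_go fuel num_sub_index_values num_sub_indices (sub_index + 1) j counter)
        counter

def Recursive_Counter (num_sub_index_values : Int) (num_sub_indices : Int) (sub_index : Int) (sub_index_value : Int) (counter : Int) : Int :=
  RC_go ((num_sub_indices - 1 - sub_index).toNat + 1) num_sub_index_values num_sub_indices sub_index sub_index_value counter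

-- ===== PORT B =====
def Recursive_Counter_alt (num_sub_index_values : Int) (num_sub_indices : Int) (sub_index : Int) (sub_index_value : Int) (counter : Int) : Int :=
  let remaining := num_sub_indices - sub_index
  let values := num_sub_index_values - sub_index_value
  if values ≤ 0 then counter
  else
    counter +
      (PySem.List.pyRange 1 (remaining + 1)).foldl
        (fun num i => PySem.Int.floordiv (num * (values + i - 1)) i) 1

-- ===== PRECONDITION & SPEC =====
-- Pre_ excludes exactly the inputs where Python A raises: the two asserts
-- (num_sub_indices ≤ 0 or num_sub_index_values ≤ 0 → AssertionError) and
-- sub_index > num_sub_indices - 1 with a nonempty value range, where A recurses forever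
-- (RecursionError); with an empty range (num_sub_index_values ≤ sub_index_value) A returns.
def Pre_Recursive_Counter (num_sub_index_values : Int) (num_sub_indices : Int) (sub_index : Int) (sub_index_value : Int) (counter : Int) : Prop :=
  0 < num_sub_indices ∧ 0 < num_sub_index_values ∧
    (sub_index ≤ num_sub_indices - 1 ∨ num_sub_index_values ≤ sub_index_value)
instance (num_sub_index_values : Int) (num_sub_indices : Int) (sub_index : Int) (sub_index_value : Int) (counter : Int) : Decidable (Pre_Recursive_Counter num_sub_index_values num_sub_indices sub_index sub_index_value counter) := by unfold Pre_Recursive_Counter; infer_instance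

def pvWitness_Recursive_Counter : Int × Int × Int × Int × Int := (4, 2, 0, 0, 0)

-- When sub_index = num_sub_indices - 1 and sub_index_value > num_sub_index_values, A returns
-- counter + (num_sub_index_values - sub_index_value), a NEGATIVE contribution; B returns counter,
-- the intended value: no multi-index has a sub-index value beyond the allowed range.
def D_Recursive_Counter (num_sub_index_values : Int) (num_sub_indices : Int) (sub_index : Int) (sub_index_value : Int) (counter : Int) : Prop :=
  sub_index = num_sub_indices - 1 ∧ num_sub_index_values < sub_index_value
instance (num_sub_index_values : Int) (num_sub_indices : Int) (sub_index : Int) (sub_index_value : Int) (counter : Int) : Decidable (D_Recursive_Counter num_sub_index_values num_sub_indices sub_index sub_index_value counter) := by unfold D_Recursive_Counter; infer_instance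

def Spec_Recursive_Counter (num_sub_index_values : Int) (num_sub_indices : Int) (sub_index : Int) (sub_index_value : Int) (counter : Int) (out : Int) : Prop := ¬ D_Recursive_Counter num_sub_index_values num_sub_indices sub_index sub_index_value counter → out = Recursive_Counter_alt num_sub_index_values num_sub_indices sub_index sub_index_value counter
instance (num_sub_index_values : Int) (num_sub_indices : Int) (sub_index : Int) (sub_index_value : Int) (counter : Int) (out : Int) : Decidable (Spec_Recursive_Counter num_sub_index_values num_sub_indices sub_index sub_index_value counter out) := by unfold Spec_Recursive_Counter; infer_instance

def pvDiffWitness_Recursive_Counter : Int × Int × Int × Int × Int := (3, 2, 1, 5, 0)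
def pvDiffWitnessOut_Recursive_Counter : Int × Int := (-2, 0)

-- ===== CLAIM (what is proved, stated in full; the proofs are below) =====
def Claim_unchanged_Recursive_Counter : Prop := ∀ (num_sub_index_values : Int) (num_sub_indices : Int) (sub_index : Int) (sub_index_value : Int) (counter : Int), Dom_Recursive_Counter num_sub_index_values num_sub_indices sub_index sub_index_value counter → Pre_Recursive_Counter num_sub_index_values num_sub_indices sub_index sub_index_value counter → Spec_Recursive_Counter num_sub_index_values num_sub_indices sub_index sub_index_value counter (Recursive_Counter num_sub_index_values num_sub_indices sub_index sub_index_value counter)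
def Claim_changed_Recursive_Counter : Prop := Dom_Recursive_Counter (pvDiffWitness_Recursive_Counter.1) (pvDiffWitness_Recursive_Counter.2.1) (pvDiffWitness_Recursive_Counter.2.2.1) (pvDiffWitness_Recursive_Counter.2.2.2.1) (pvDiffWitness_Recursive_Counter.2.2.2.2) ∧ Pre_Recursive_Counter (pvDiffWitness_Recursive_Counter.1) (pvDiffWitness_Recursive_Counter.2.1) (pvDiffWitness_Recursive_Counter.2.2.1) (pvDiffWitness_Recursive_Counter.2.2.2.1) (pvDiffWitness_Recursive_Counter.2.2.2.2) ∧ D_Recursive_Counter (pvDiffWitness_Recursive_Counter.1) (pvDiffWitness_Recursive_Counter.2.1) (pvDiffWitness_Recursive_Counter.2.2.1) (pvDiffWitness_Recursive_Counter.2.2.2.1) (pvDiffWitness_Recursive_Counter.2.2.2.2) ∧ Recursive_Counter (pvDiffWitness_Recursive_Counter.1) (pvDiffWitness_Recursive_Counter.2.1) (pvDiffWitness_Recursive_Counter.2.2.1) (pvDiffWitness_Recursive_Counter.2.2.2.1) (pvDiffWitness_Recursive_Counter.2.2.2.2) = pvDiffWitnessOut_Recursive_Counter.1 ∧ Recursive_Counter_alt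 (pvDiffWitness_Recursive_Counter.1) (pvDiffWitness_Recursive_Counter.2.1) (pvDiffWitness_Recursive_Counter.2.2.1) (pvDiffWitness_Recursive_Counter.2.2.2.1) (pvDiffWitness_Recursive_Counter.2.2.2.2) = pvDiffWitnessOut_Recursive_Counter.2 ∧ pvDiffWitnessOut_Recursive_Counter.1 ≠ pvDiffWitnessOut_Recursive_Counter.2
def Claim_exact_Recursive_Counter : Prop := ∀ (num_sub_index_values : Int) (num_sub_indices : Int) (sub_index : Int) (sub_index_value : Int) (counter : Int), Dom_Recursive_Counter num_sub_index_values num_sub_indices sub_index sub_index_value counter → Pre_Recursive_Counter num_sub_index_values num_sub_indices sub_index sub_index_value counter → D_Recursive_Counter num_sub_index_values num_sub_indices sub_index sub_index_value counter → Recursive_Counter num_sub_index_values num_sub_indices sub_index sub_index_value counter ≠ Recursive_Counter_alt num_sub_index_values num_sub_indices sub_index sub_index_value counter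


-- ===== LEMMAS AND PROOFS =====

-- The number of size-r multisets over m available values (0 when m ≤ 0), as an Int.
def chInt (r : Nat) (m : Int) : Int := ((m.toNat + r - 1).choose r : Int)

lemma chInt_nonpos {r : Nat} (hr : 1 ≤ r) {m : Int} (hm : m ≤ 0) : chInt r m = 0 := by
  unfold chInt
  rw [Int.toNat_of_nonpos hm]
  simp [Nat.choose_eq_zero_of_lt (show r - 1 < r by omega)]

lemma chInt_one {m : Int} (hm : 0 ≤ m) : chInt 1 m = m := by
  unfold chInt
  simp [Int.toNat_of_nonneg hm]

lemma chInt_pascal (r : Nat) (hr : 1 ≤ r) (m : Int) (hm : 1 ≤ m) :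
    chInt r m + chInt (r + 1) (m - 1) = chInt (r + 1) m := by
  unfold chInt
  have h1 : m.toNat + r - 1 = (m.toNat - 1) + r := by omega
  have h2 : (m - 1).toNat = m.toNat - 1 := by omega
  have h3 : m.toNat + (r + 1) - 1 = ((m.toNat - 1) + r) + 1 := by omega
  rw [h1, h2, h3]
  have h4 : m.toNat - 1 + (r + 1) - 1 = (m.toNat - 1) + r := by omega
  rw [h4, Nat.choose_succ_succ ((m.toNat - 1) + r) r]
  push_cast
  ring

-- hockey-stick accumulation: A's loop values j contribute chInt r (nsiv - j) each
lemma sum_chInt (r : Nat) (hr : 1 ≤ r) : ∀ (n : Nat) (nsiv sv c : Int), (nsiv - sv).toNat = n →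
    (PySem.List.pyRange sv nsiv).foldl (fun c j => c + chInt r (nsiv - j)) c
      = c + chInt (r + 1) (nsiv - sv) := by
  intro n
  induction n with
  | zero =>
    intro nsiv sv c h
    have hempty : PySem.List.pyRange sv nsiv = [] := by simp [PySem.List.pyRange]; omega
    rw [hempty, chInt_nonpos (by omega) (by omega)]
    simp
  | succ n ih =>
    intro nsiv sv c h
    rw [PySem.List.pyRange_one_cons (show sv < nsiv by omega)]
    simp only [List.foldl_cons]
    rw [ih nsiv (sv + 1) _ (by omega)]
    rw [show nsiv - (sv + 1) = (nsiv - sv) - 1 by ring,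
        add_assoc, chInt_pascal r hr (nsiv - sv) (by omega)]

-- A's recursion adds exactly chInt r (nsiv - sv) to the accumulator
lemma A_eq : ∀ (r : Nat), 1 ≤ r → ∀ (nsiv nsi si sv c : Int), si = nsi - (r : Int) →
    (2 ≤ r ∨ 0 ≤ nsiv - sv) →
    RC_go r nsiv nsi si sv c = c + chInt r (nsiv - sv) := by
  intro r
  induction r with
  | zero => omega
  | succ k ih =>
    intro _ nsiv nsi si sv c hsi hside
    by_cases hk : k = 0
    · subst hk
      have hb : si = nsi - 1 := by omega
      have hm : 0 ≤ nsiv - sv := by omega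
      simp only [RC_go, if_pos hb, chInt_one hm]
    · have hne : ¬ si = nsi - 1 := by push_cast at hsi; omega
      simp only [RC_go, if_neg hne]
      rw [PySem.List.foldl_congr_mem _ _
            (fun c j => c + chInt k (nsiv - j)) c
            (by
              intro acc j hj
              have hjmem := (PySem.List.mem_pyRange_one).mp hj
              exact ih (by omega) nsiv nsi (si + 1) j acc (by push_cast at hsi ⊢; omega)
                (Or.inr (by omega)))]
      rw [sum_chInt k (by omega) (nsiv - sv).toNat nsiv sv c rfl]

-- one step of B's product: chInt r v * (v + r) = chInt (r+1) v * (r + 1), exactly divisible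
lemma chInt_step (r : Nat) (hr : 1 ≤ r) (v : Int) (hv : 1 ≤ v) :
    chInt r v * (v + (r : Int)) = chInt (r + 1) v * ((r : Int) + 1) := by
  unfold chInt
  have h1 : v.toNat + r - 1 + 1 = v.toNat + r := by omega
  have hkey := Nat.add_one_mul_choose_eq (v.toNat + r - 1) r
  simp only [h1] at hkey
  have h2 : v.toNat + (r + 1) - 1 = v.toNat + r := by omega
  have hcast : v + (r : Int) = ((v.toNat + r : Nat) : Int) := by push_cast; omega
  rw [h2, hcast, mul_comm (((v.toNat + r - 1).choose r : Int)) _]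
  exact_mod_cast hkey

-- B's product loop computes chInt r v (for v ≥ 1)
lemma B_loop (r : Nat) (hr : 1 ≤ r) (v : Int) (hv : 1 ≤ v) :
    (PySem.List.pyRange 1 ((r : Int) + 1)).foldl
      (fun num i => PySem.Int.floordiv (num * (v + i - 1)) i) 1 = chInt r v := by
  induction r with
  | zero => omega
  | succ k ih =>
    by_cases hk : k = 0
    · subst hk
      rw [show ((1:Nat) : Int) + 1 = (1:Int) + 1 by norm_num,
          show PySem.List.pyRange 1 ((1:Int) + 1) = [1] by decide]
      simp only [List.foldl_cons, List.foldl_nil, one_mul]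
      rw [PySem.Int.floordiv_eq_ediv_of_pos (by omega)]
      simp [chInt_one (by omega : (0:Int) ≤ v)]
    · have hsplit : PySem.List.pyRange 1 (((k + 1 : Nat) : Int) + 1)
          = PySem.List.pyRange 1 ((k : Int) + 1) ++ [((k : Int) + 1)] := by
        rw [show (((k + 1 : Nat) : Int) + 1) = ((k : Int) + 1) + 1 by push_cast; ring]
        exact PySem.List.pyRange_one_succ_right (by omega)
      rw [hsplit, List.foldl_append, ih (by omega)]
      simp only [List.foldl_cons, List.foldl_nil]
      rw [show v + ((k : Int) + 1) - 1 = v + (k : Int) by ring,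
          chInt_step k (by omega) v hv,
          PySem.Int.floordiv_eq_ediv_of_pos (by positivity),
          Int.mul_ediv_cancel _ (by positivity)]

-- ===== VERDICT (by name: the statement is the Claim_ definition above) =====
theorem Recursive_Counter_spec : Claim_unchanged_Recursive_Counter := by
  intro nsiv nsi si sv c _hdom hpre hnD
  obtain ⟨h1, h2, h3⟩ := hpre
  unfold D_Recursive_Counter at hnD
  rw [not_and, not_lt] at hnD
  by_cases hlo : si ≤ nsi - 1
  case neg =>
    -- sub_index beyond the last one: Pre_ gives an empty value range, both return counter
    have hsv : nsiv ≤ sv := by omega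
    unfold Recursive_Counter Recursive_Counter_alt
    rw [show (nsi - 1 - si).toNat + 1 = 1 by omega]
    simp only [RC_go, if_neg (show ¬ si = nsi - 1 by omega)]
    rw [show PySem.List.pyRange sv nsiv = [] by simp [PySem.List.pyRange]; omega]
    rw [if_pos (by omega : nsiv - sv ≤ 0)]
    rfl
  set r := (nsi - si).toNat with hrdef
  have hr1 : 1 ≤ r := by omega
  have hside : 2 ≤ r ∨ 0 ≤ nsiv - sv := by
    by_cases h : 2 ≤ r
    · exact Or.inl h
    · exact Or.inr (by have := hnD (by omega); omega)
  unfold Recursive_Counter Recursive_Counter_alt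
  rw [show (nsi - 1 - si).toNat + 1 = r by omega,
      A_eq r hr1 nsiv nsi si sv c (by omega) hside]
  dsimp only
  by_cases hv : nsiv - sv ≤ 0
  · rw [if_pos hv, chInt_nonpos hr1 (by omega)]; ring
  · rw [if_neg hv, show nsi - si = (r : Int) by omega,
        B_loop r hr1 (nsiv - sv) (by omega)]

theorem Recursive_Counter_changed : Claim_changed_Recursive_Counter := by
  unfold Claim_changed_Recursive_Counter; decide

theorem Recursive_Counter_tight : Claim_exact_Recursive_Counter := by
  intro nsiv nsi si sv c _hdom hpre hD
  obtain ⟨h1, h2, h3⟩ := hpre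
  obtain ⟨hD1, hD2⟩ := hD
  unfold Recursive_Counter Recursive_Counter_alt
  rw [show (nsi - 1 - si).toNat + 1 = 1 by omega]
  simp only [RC_go, if_pos hD1]
  rw [if_pos (by omega : nsiv - sv ≤ 0)]
  omega
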